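-- pv_equiv track=rewrite | github.com/nguyenthienhy/InverstNormalization | convert_number.py | convert_phonenumber
-- ===== SOURCE A (Python) =====
-- basicNumberToWord = {
--         '0': 'không',
--         '1': 'một',
--         '2': 'hai',
--         '3': 'ba',
--         '4': 'bốn',
--         '5': 'năm',
--         '6': 'sáu',
--         '7': 'bảy',
--         '8': 'tám',
--         '9': 'chín'
-- }
--
-- def convert_phonenumber(numberOrString):
--     number = str(numberOrString)
--     text_number = number.replace('+', 'cộng').replace('-', ' ').replace('.', ' ')
--     str_number = text_number.replace('cộng', '').replace(' ', '').strip()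
--     n = len(str_number)
--     if str_number[0] == '0' and n not in [10, 11]:
--         return str_number
--     if str_number[0] == '8' and n not in [11, 12]:
--         return str_number
--     for k, v in basicNumberToWord.items():
--         text_number = text_number.replace(k, v)
--     return text_number
-- ===== SOURCE B (Python) =====
-- basicNumberToWord = {
--         '0': 'không',
--         '1': 'một',
--         '2': 'hai',
--         '3': 'ba',
--         '4': 'bốn',
--         '5': 'năm',
--         '6': 'sáu',
--         '7': 'bảy',
--         '8': 'tám',
--         '9': 'chín'
-- }
--
-- separatorToWord = {'+': 'cộng', '-': ' ', '.': ' '}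
--
-- def convert_phonenumber(numberOrString):
--     number = str(numberOrString)
--     str_number = ''.join(c for c in number if c not in '+-. ').strip()
--     n = len(str_number)
--     if str_number[0] == '0' and n not in [10, 11]:
--         return str_number
--     if str_number[0] == '8' and n not in [11, 12]:
--         return str_number
--     return ''.join(basicNumberToWord.get(c, separatorToWord.get(c, c)) for c in number)
-- ===== Notes on version B (the rewrite author's own statement) =====
-- stated objective: alternative
-- what changed: B drops A's staged whole-string rewriting (three separator .replace passes, a 'cong'/space removal pass, then ten digit .replace passes) and instead derives str_number by one filter+strip over the original characters and the output by one per-character dict-lookup join over the original string.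
-- outside the precondition, e.g. on convert_phonenumber(''): A raises IndexError, B raises IndexError; on convert_phonenumber('+'): A raises IndexError, B raises IndexError; on convert_phonenumber('-'): A raises IndexError, B raises IndexError
import Mathlib
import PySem

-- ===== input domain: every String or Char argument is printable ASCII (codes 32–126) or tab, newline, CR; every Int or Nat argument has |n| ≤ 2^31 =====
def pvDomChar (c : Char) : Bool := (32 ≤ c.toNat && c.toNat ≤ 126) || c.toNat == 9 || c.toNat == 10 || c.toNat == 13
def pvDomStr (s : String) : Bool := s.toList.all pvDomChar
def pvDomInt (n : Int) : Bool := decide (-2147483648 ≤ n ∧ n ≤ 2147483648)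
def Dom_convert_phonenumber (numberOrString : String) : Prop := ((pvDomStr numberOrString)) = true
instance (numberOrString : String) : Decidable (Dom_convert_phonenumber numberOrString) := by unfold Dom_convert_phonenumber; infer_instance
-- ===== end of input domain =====

-- B replaces A's fifteen staged whole-string .replace passes by two single character-level
-- passes (filter+strip for str_number, a per-character dict-lookup join for the output).

-- ===== PORT A =====
-- the module constant basicNumberToWord (a dict literal)
def pvItems : List (String × String) :=
  [("0","không"),("1","một"),("2","hai"),("3","ba"),("4","bốn"),
   ("5","năm"),("6","sáu"),("7","bảy"),("8","tám"),("9","chín")]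

def basicNumberToWord : PySem.Dict String String := PySem.Dict.ofList pvItems

def convert_phonenumber (numberOrString : String) : String :=
  let number := numberOrString
  let text_number := PySem.Str.replace (PySem.Str.replace (PySem.Str.replace number "+" "cộng") "-" " ") "." " "
  let str_number := PySem.Str.strip (PySem.Str.replace (PySem.Str.replace text_number "cộng" "") " " "")
  let n := PySem.Str.len str_number
  match PySem.Str.pyGet? str_number 0 with
  | none => ""  -- str_number[0] raises IndexError in Python (excluded by Pre_)
  | some c =>
    if c = '0' ∧ ¬ (n = 10 ∨ n = 11) then str_number
    else if c = '8' ∧ ¬ (n = 11 ∨ n = 12) then str_number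
    else basicNumberToWord.items.foldl (fun t kv => PySem.Str.replace t kv.1 kv.2) text_number

-- ===== PORT B =====
-- the module constant separatorToWord of Source B
def separatorToWord : PySem.Dict String String :=
  PySem.Dict.ofList [("+","cộng"),("-"," "),("."," ")]

def convert_phonenumber_alt (numberOrString : String) : String :=
  let number := numberOrString
  -- ''.join(c for c in number if c not in '+-. ').strip()   ('c not in str' on a char = list non-membership)
  let str_number := PySem.Str.strip
    (String.ofList (number.toList.filter (fun c => !("+-. ".toList.contains c))))
  let n := PySem.Str.len str_number
  match PySem.Str.pyGet? str_number 0 with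
  | none => ""  -- str_number[0] raises IndexError in Python (excluded by Pre_)
  | some c =>
    if c = '0' ∧ ¬ (n = 10 ∨ n = 11) then str_number
    else if c = '8' ∧ ¬ (n = 11 ∨ n = 12) then str_number
    else PySem.Str.join ""
      (number.toList.map (fun ch =>
        basicNumberToWord.getD (String.ofList [ch])
          (separatorToWord.getD (String.ofList [ch]) (String.ofList [ch]))))

-- ===== PRECONDITION & SPEC =====
-- Pre_ excludes exactly the inputs with no character outside whitespace and the separators
-- '+', '-', '.': there A's normalized str_number is empty and str_number[0] raises IndexError.
def Pre_convert_phonenumber (numberOrString : String) : Prop :=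
  numberOrString.toList.any
    (fun c => !(PySem.Chars.isspace c || c == '+' || c == '-' || c == '.')) = true
instance (numberOrString : String) : Decidable (Pre_convert_phonenumber numberOrString) := by
  unfold Pre_convert_phonenumber; infer_instance

def pvWitness_convert_phonenumber : String := "0123-456.789"

def Spec_convert_phonenumber (numberOrString : String) (out : String) : Prop := out = convert_phonenumber_alt numberOrString
instance (numberOrString : String) (out : String) : Decidable (Spec_convert_phonenumber numberOrString out) := by unfold Spec_convert_phonenumber; infer_instance

-- ===== CLAIM (what is proved, stated in full; the proofs are below) =====
def Claim_equal_convert_phonenumber : Prop := ∀ (numberOrString : String), Dom_convert_phonenumber numberOrString → Pre_convert_phonenumber numberOrString → Spec_convert_phonenumber numberOrString (convert_phonenumber numberOrString)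

-- ===== LEMMAS AND PROOFS =====

-- the separator normalization of A, seen per character
def fSep (c : Char) : List Char :=
  if c = '+' then "cộng".toList else if c = '-' ∨ c = '.' then [' '] else [c]

-- the per-character effect of removing 'cộng' after the normalization
def fSep0 (c : Char) : List Char :=
  if c = '+' then [] else if c = '-' ∨ c = '.' then [' '] else [c]

lemma flatMap_flatMap' {α : Type} (l : List α) (f g : α → List α) :
    (l.flatMap f).flatMap g = l.flatMap (fun c => (f c).flatMap g) := by
  induction l with
  | nil => rfl
  | cons c t ih => simp [List.flatMap_cons, ih]

-- single-character replace, described as a per-character flatMap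
lemma go_single (k : Char) (v : List Char) :
    ∀ (fuel : Nat) (l acc : List Char), l.length ≤ fuel →
      PySem.Chars.replace.go [k] v fuel l acc
        = acc.reverse ++ l.flatMap (fun c => if c = k then v else [c]) := by
  intro fuel
  induction fuel with
  | zero => intro l acc h; cases l with
    | nil => simp [PySem.Chars.replace.go]
    | cons c t => simp at h
  | succ n ih =>
    intro l acc h
    cases l with
    | nil => simp [PySem.Chars.replace.go]
    | cons c t =>
      by_cases hk : c = k
      · subst hk
        have : List.isPrefixOf [c] (c :: t) = true := by simp [List.isPrefixOf]
        simp only [PySem.Chars.replace.go, this, if_pos, List.length_cons,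
          List.length_nil, List.drop_succ_cons, List.drop_zero]
        rw [ih t _ (by simpa using h)]
        simp
      · have : List.isPrefixOf [k] (c :: t) = false := by
          simp [List.isPrefixOf]; intro h'; exact absurd h'.symm hk
        simp only [PySem.Chars.replace.go, this]
        rw [if_neg (by simp), ih t _ (by simpa using h)]
        simp [hk]

lemma replace_single (s : List Char) (k : Char) (v : List Char) :
    PySem.Chars.replace s [k] v = s.flatMap (fun c => if c = k then v else [c]) := by
  rw [PySem.Chars.replace]
  simp [go_single k v s.length s [] (le_refl _)]

-- A's three separator replaces, fused into one per-character pass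
lemma tn_eq (l : List Char) :
    PySem.Chars.replace (PySem.Chars.replace (PySem.Chars.replace l ['+'] "cộng".toList) ['-'] [' ']) ['.'] [' ']
      = l.flatMap fSep := by
  rw [replace_single, replace_single, replace_single, flatMap_flatMap', flatMap_flatMap']
  congr 1
  funext c
  by_cases h1 : c = '+'
  · subst h1; decide
  by_cases h2 : c = '-'
  · subst h2; decide
  by_cases h3 : c = '.'
  · subst h3; decide
  simp [fSep, h1, h2, h3]

lemma fSep_ne_nil (c : Char) : fSep c ≠ [] := by
  by_cases h1 : c = '+'
  · subst h1; decide
  by_cases h2 : c = '-' ∨ c = '.' <;> simp [fSep, h1, h2]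

lemma fSep_head (c : Char) (hc : ¬ c = 'ộ') :
    ∀ y ys, fSep c = y :: ys → ¬ y = 'ộ' := by
  intro y ys h
  by_cases h1 : c = '+'
  · subst h1; simp [fSep] at h; intro hy; rw [hy] at h; exact absurd h.1.symm (by decide)
  by_cases h2 : c = '-' ∨ c = '.'
  · simp [fSep, h1, h2] at h; intro hy; rw [hy] at h; exact absurd h.1.symm (by decide)
  · simp [fSep, h1, h2] at h; intro hy; rw [hy] at h; exact absurd h.1.symm (fun e => hc e.symm)

-- heads produced by fSep are never 'ộ' on a 'ộ'-free list
lemma head_ne (t : List Char) (hT : t.all (fun c => !(c == 'ộ')) = true) :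
    ∀ y ys, t.flatMap fSep = y :: ys → ¬ y = 'ộ' := by
  cases t with
  | nil => intro y ys h; simp at h
  | cons c t' =>
    intro y ys h
    simp only [List.all_cons, Bool.and_eq_true] at hT
    have hc : ¬ c = 'ộ' := by
      have := hT.1; simp at this; exact this
    rw [List.flatMap_cons] at h
    cases hf : fSep c with
    | nil => exact absurd hf (fSep_ne_nil c)
    | cons a as =>
      rw [hf] at h
      have : a = y := by simpa using congrArg List.head? h
      exact this ▸ fSep_head c hc a as hf

-- removing the inserted 'cộng' blocks, at the go level
lemma go_decong :
    ∀ (fuel : Nat) (l acc : List Char), l.all (fun c => !(c == 'ộ')) = true →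
      (l.flatMap fSep).length ≤ fuel →
      PySem.Chars.replace.go "cộng".toList [] fuel (l.flatMap fSep) acc
        = acc.reverse ++ l.flatMap fSep0 := by
  intro fuel
  induction fuel with
  | zero =>
    intro l acc hD h
    cases l with
    | nil => simp [PySem.Chars.replace.go]
    | cons c t =>
      exfalso
      have h1 : (fSep c).length ≥ 1 := by
        cases hf : fSep c with
        | nil => exact absurd hf (fSep_ne_nil c)
        | cons a as => simp
      rw [List.flatMap_cons, List.length_append] at h
      omega
  | succ n ih =>
    intro l acc hD hlen
    cases l with
    | nil => simp [PySem.Chars.replace.go]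
    | cons c t =>
      have hDt : t.all (fun c => !(c == 'ộ')) = true := by
        simp only [List.all_cons, Bool.and_eq_true] at hD; exact hD.2
      by_cases h1 : c = '+'
      · subst h1
        have hfl : ((('+') :: t).flatMap fSep) = 'c' :: 'ộ' :: 'n' :: 'g' :: t.flatMap fSep := by
          simp [fSep]
        rw [hfl]
        have hpre : List.isPrefixOf "cộng".toList ('c' :: 'ộ' :: 'n' :: 'g' :: t.flatMap fSep) = true := by
          show List.isPrefixOf ['c','ộ','n','g'] _ = true
          simp [List.isPrefixOf]
        simp only [PySem.Chars.replace.go, hpre, if_pos]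
        have hdrop : List.drop ("cộng".toList).length ('c' :: 'ộ' :: 'n' :: 'g' :: t.flatMap fSep)
            = t.flatMap fSep := by
          show List.drop 4 _ = _
          simp [List.drop]
        rw [hdrop]
        have hlen' : (t.flatMap fSep).length ≤ n := by
          rw [hfl] at hlen; simp only [List.length_cons] at hlen; omega
        rw [ih t _ hDt hlen']
        simp [List.flatMap_cons, fSep0]
      · have hx : fSep c = [if c = '-' ∨ c = '.' then ' ' else c] := by
          by_cases h2 : c = '-' ∨ c = '.' <;> simp [fSep, h1, h2]
        have hfl : ((c :: t).flatMap fSep) = (if c = '-' ∨ c = '.' then ' ' else c) :: t.flatMap fSep := by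
          rw [List.flatMap_cons, hx]; rfl
        rw [hfl]
        have hpre : List.isPrefixOf "cộng".toList
            ((if c = '-' ∨ c = '.' then ' ' else c) :: t.flatMap fSep) = false := by
          by_cases hxc : (if c = '-' ∨ c = '.' then ' ' else c) = 'c'
          · rw [hxc]
            cases hflt : t.flatMap fSep with
            | nil => decide
            | cons y ys =>
              have hy := head_ne t hDt y ys hflt
              show List.isPrefixOf ('c' :: 'ộ' :: 'n' :: 'g' :: []) ('c' :: y :: ys) = false
              simp [List.isPrefixOf]
              intro h'; exact absurd h'.symm hy
          · show List.isPrefixOf ('c' :: 'ộ' :: 'n' :: 'g' :: []) _ = false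
            simp [List.isPrefixOf]
            intro h'; exact absurd h'.symm hxc
        simp only [PySem.Chars.replace.go, hpre]
        rw [if_neg (by simp)]
        have hlen' : (t.flatMap fSep).length ≤ n := by
          rw [hfl] at hlen; simp only [List.length_cons] at hlen; omega
        rw [ih t _ hDt hlen']
        have hx0 : fSep0 c = [if c = '-' ∨ c = '.' then ' ' else c] := by
          by_cases h2 : c = '-' ∨ c = '.' <;> simp [fSep0, h1, h2]
        rw [List.flatMap_cons, hx0]
        simp

lemma decong (l : List Char) (hD : l.all (fun c => !(c == 'ộ')) = true) :
    PySem.Chars.replace (l.flatMap fSep) "cộng".toList [] = l.flatMap fSep0 := by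
  rw [PySem.Chars.replace]
  rw [if_neg (by decide)]
  exact go_decong _ _ [] hD (le_refl _)

-- dropping spaces from the fSep0 image is exactly the filter of Source B
lemma sp_filter (l : List Char) :
    l.flatMap (fun c => (fSep0 c).flatMap (fun c' => if c' = ' ' then [] else [c']))
      = l.filter (fun c => !("+-. ".toList.contains c)) := by
  induction l with
  | nil => rfl
  | cons c t ih =>
    rw [List.flatMap_cons, List.filter_cons, ih]
    by_cases h1 : c = '+'
    · subst h1; simp [fSep0]
    by_cases h2 : c = '-' ∨ c = '.'
    · rcases h2 with h2 | h2 <;> (subst h2; simp [fSep0])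
    by_cases h3 : c = ' '
    · subst h3; simp [fSep0]
    · have hmem : ("+-. ".toList.contains c) = false := by
        have hnm : ¬ c ∈ ("+-. ".toList) := by
          intro hc
          rw [show ("+-. ".toList) = ['+','-','.',' '] from rfl] at hc
          simp only [List.mem_cons, List.not_mem_nil, or_false] at hc
          rcases hc with h | h | h | h
          · exact h1 h
          · exact h2 (Or.inl h)
          · exact h2 (Or.inr h)
          · exact h3 h
        simpa using hnm
      simp [fSep0, h1, h2, h3]

-- then removing spaces leaves exactly the filtered original characters
lemma core_eq (l : List Char) (hD : l.all (fun c => !(c == 'ộ')) = true) :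
    PySem.Chars.replace (PySem.Chars.replace (l.flatMap fSep) "cộng".toList []) [' '] []
      = l.filter (fun c => !("+-. ".toList.contains c)) := by
  rw [decong l hD, replace_single, flatMap_flatMap']
  exact sp_filter l

-- (lemmas for the final branch, reused per-character machinery)
def cItems : List (Char × List Char) :=
  [('0', "không".toList),('1', "một".toList),('2', "hai".toList),('3', "ba".toList),
   ('4', "bốn".toList),('5', "năm".toList),('6', "sáu".toList),('7', "bảy".toList),
   ('8', "tám".toList),('9', "chín".toList)]

lemma foldl_replace_append (ps : List (Char × List Char)) :
    ∀ a b : List Char,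
      ps.foldl (fun t kv => PySem.Chars.replace t [kv.1] kv.2) (a ++ b)
        = ps.foldl (fun t kv => PySem.Chars.replace t [kv.1] kv.2) a
          ++ ps.foldl (fun t kv => PySem.Chars.replace t [kv.1] kv.2) b := by
  induction ps with
  | nil => intro a b; simp
  | cons kv ps ih =>
    intro a b
    have hsplit : PySem.Chars.replace (a ++ b) [kv.1] kv.2
        = PySem.Chars.replace a [kv.1] kv.2 ++ PySem.Chars.replace b [kv.1] kv.2 := by
      simp [replace_single]
    rw [List.foldl_cons, hsplit, List.foldl_cons, List.foldl_cons, ih]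

lemma foldl_replace_flatMap (ps : List (Char × List Char)) (t : List Char) :
    ps.foldl (fun t kv => PySem.Chars.replace t [kv.1] kv.2) t
      = t.flatMap (fun c => ps.foldl (fun t kv => PySem.Chars.replace t [kv.1] kv.2) [c]) := by
  induction t with
  | nil =>
    induction ps with
    | nil => simp
    | cons kv ps ih =>
      have h0 : PySem.Chars.replace [] [kv.1] kv.2 = ([] : List Char) := by
        simp [replace_single]
      rw [List.foldl_cons, h0]
      simpa using ih
  | cons c t ih =>
    have : (c :: t) = [c] ++ t := rfl
    rw [this, foldl_replace_append, ih]
    simp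

lemma foldl_str_toList (t : String) :
    (pvItems.foldl (fun a kv => PySem.Str.replace a kv.1 kv.2) t).toList
      = cItems.foldl (fun a kv => PySem.Chars.replace a [kv.1] kv.2) t.toList := by
  simp [pvItems, cItems, PySem.Str.replace]

-- B's nested dictionary lookup, abbreviated
def bLook (c : Char) : String :=
  basicNumberToWord.getD (String.ofList [c])
    (separatorToWord.getD (String.ofList [c]) (String.ofList [c]))

-- A's digit replaces applied to one normalized character block = B's lookup on the original character
lemma per_char (c : Char) :
    (fSep c).flatMap (fun c' => cItems.foldl (fun t kv => PySem.Chars.replace t [kv.1] kv.2) [c'])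
      = (bLook c).toList := by
  by_cases hp : c = '+'; · subst hp; decide
  by_cases hm : c = '-'; · subst hm; decide
  by_cases hd : c = '.'; · subst hd; decide
  by_cases h0 : c = '0'; · subst h0; decide
  by_cases h1 : c = '1'; · subst h1; decide
  by_cases h2 : c = '2'; · subst h2; decide
  by_cases h3 : c = '3'; · subst h3; decide
  by_cases h4 : c = '4'; · subst h4; decide
  by_cases h5 : c = '5'; · subst h5; decide
  by_cases h6 : c = '6'; · subst h6; decide
  by_cases h7 : c = '7'; · subst h7; decide
  by_cases h8 : c = '8'; · subst h8; decide
  by_cases h9 : c = '9'; · subst h9; decide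
  have hf : fSep c = [c] := by simp [fSep, hp, hm, hd]
  rw [hf]
  have lhs : cItems.foldl (fun t kv => PySem.Chars.replace t [kv.1] kv.2) [c] = [c] := by
    simp [cItems, replace_single, h0, h1, h2, h3, h4, h5, h6, h7, h8, h9]
  simp only [List.flatMap_cons, List.flatMap_nil, List.append_nil, lhs]
  have e : ∀ (d : Char), ¬ c = d → ((String.ofList [d] : String) == String.ofList [c]) = false := by
    intro d hd'
    simp [String.ext_iff]
    intro h; exact absurd h.symm hd'
  simp [bLook, basicNumberToWord, separatorToWord, pvItems, PySem.Dict.ofList, PySem.Dict.getD,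
    PySem.Dict.get?, PySem.Dict.update, PySem.Dict.empty, PySem.Dict.insert, List.find?,
    e _ h0, e _ h1, e _ h2, e _ h3, e _ h4, e _ h5, e _ h6, e _ h7, e _ h8, e _ h9,
    e _ hp, e _ hm, e _ hd]

lemma items_eq : basicNumberToWord.items = pvItems := by rfl

lemma flatten_intersperse_nil (l : List (List Char)) :
    (List.intersperse ([] : List Char) l).flatten = l.flatten := by
  induction l with
  | nil => rfl
  | cons a t ih => cases t with
    | nil => rfl
    | cons b u => simp [List.intersperse] at *; simpa using ih

lemma join_nil_toList (parts : List String) :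
    (PySem.Str.join "" parts).toList = (parts.map String.toList).flatten := by
  simp [PySem.Str.join, PySem.Chars.join, List.intercalate, flatten_intersperse_nil]

set_option maxHeartbeats 2000000 in
-- the whole final branch
lemma final_branch (s : String) :
    basicNumberToWord.items.foldl (fun a kv => PySem.Str.replace a kv.1 kv.2)
      (PySem.Str.replace (PySem.Str.replace (PySem.Str.replace s "+" "cộng") "-" " ") "." " ")
      = PySem.Str.join "" (s.toList.map (fun ch => bLook ch)) := by
  apply String.toList_inj.mp
  rw [items_eq, foldl_str_toList, join_nil_toList]
  have htn : (PySem.Str.replace (PySem.Str.replace (PySem.Str.replace s "+" "cộng") "-" " ") "." " ").toList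
      = s.toList.flatMap fSep := by
    simp only [PySem.Str.replace]
    simpa using tn_eq s.toList
  rw [htn, foldl_replace_flatMap, flatMap_flatMap', List.map_map, List.flatMap_def]
  exact congrArg List.flatten (List.map_congr_left (fun c _ => per_char c))

-- A's str_number equals B's filter+strip
lemma sn_eq (s : String) (hD : s.toList.all (fun c => !(c == 'ộ')) = true) :
    PySem.Str.strip (PySem.Str.replace (PySem.Str.replace
        (PySem.Str.replace (PySem.Str.replace (PySem.Str.replace s "+" "cộng") "-" " ") "." " ")
        "cộng" "") " " "")
      = PySem.Str.strip (String.ofList (s.toList.filter (fun c => !("+-. ".toList.contains c)))) := by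
  have key : PySem.Chars.replace (PySem.Chars.replace (PySem.Chars.replace (PySem.Chars.replace
      (PySem.Chars.replace s.toList ['+'] "cộng".toList) ['-'] [' ']) ['.'] [' '])
      "cộng".toList []) [' '] []
        = s.toList.filter (fun c => !("+-. ".toList.contains c)) := by
    rw [tn_eq]; exact core_eq s.toList hD
  simp only [PySem.Str.replace, PySem.Str.strip, String.toList_ofList]
  rw [show ("+".toList) = ['+'] from rfl, show ("-".toList) = ['-'] from rfl,
      show (".".toList) = ['.'] from rfl, show (" ".toList) = [' '] from rfl,
      show ("".toList) = ([] : List Char) from rfl, key]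

-- Dom implies no 'ộ'
lemma dom_no_o (s : String) (h : Dom_convert_phonenumber s) :
    s.toList.all (fun c => !(c == 'ộ')) = true := by
  unfold Dom_convert_phonenumber pvDomStr at h
  rw [List.all_eq_true] at h ⊢
  intro c hc
  have := h c hc
  simp [pvDomChar] at this
  simp only [Bool.not_eq_eq_eq_not, Bool.not_true, beq_eq_false_iff_ne, ne_eq]
  intro hco; subst hco
  revert this; decide

-- ===== VERDICT (by name: the statement is the Claim_ definition above) =====
set_option maxHeartbeats 2000000 in
theorem convert_phonenumber_spec : Claim_equal_convert_phonenumber := by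
  intro s hDom _
  have hD := dom_no_o s hDom
  unfold Spec_convert_phonenumber convert_phonenumber convert_phonenumber_alt
  dsimp only []
  rw [sn_eq s hD]
  generalize PySem.Str.strip (String.ofList (s.toList.filter (fun c => !("+-. ".toList.contains c)))) = sn
  cases PySem.Str.pyGet? sn 0 with
  | none => rfl
  | some c =>
    simp only []
    split_ifs with h1 h2
    · rfl
    · rfl
    · exact final_branch s
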